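-- pv_equiv track=rewrite | github.com/crosenth/moose | classifier/subcommands/classify.py | format_taxonomy
-- ===== SOURCE A (Python) =====
-- import itertools
-- import operator
--
-- def format_taxonomy(names, selectors, asterisk='*'):
--     """
--     Create a friendly formatted string of taxonomy names. Names will
--     have an asterisk value appended *only* if the cooresponding
--     element in the selectors evaluates to True.
--     """
--     names = itertools.zip_longest(names, selectors)
--     names = ((n, asterisk if s else '')
--              for n, s in names)  # add asterisk to selected names
--     names = set(names)
--     names = sorted(names)  # sort by the name plus asterisk
--     names = itertools.groupby(names, key=operator.itemgetter(0))  # group by just the names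
--     # prefer asterisk names which will be at the bottom
--     names = (list(g)[-1] for _, g in names)
--     names = (n + a for n, a in names)  # combine names with asterisks
--     # assume species names have exactly two words
--
--     def is_species(s):
--         return len(s.split()) == 2
--
--     names = sorted(names, key=is_species)
--     names = itertools.groupby(names, key=is_species)
--
--     tax = []
--
--     for species, assigns in names:
--         if species:
--             # take the species word and combine them with a '/'
--             assigns = (a.split() for a in assigns)
--             # group by genus name
--             assigns = itertools.groupby(assigns, key=operator.itemgetter(0))
--             assigns = ((k, map(operator.itemgetter(1), g))
--                        for k, g in assigns)  # get a list of the species names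
--             assigns = ('{} {}'.format(k, '/'.join(g))
--                        for k, g in assigns)  # combine species names with '/'
--
--         tax.extend(assigns)
--
--     return ';'.join(sorted(tax))
-- ===== SOURCE B (Python) =====
-- def _sweep(state, combined):
--     """Fold one combined name into (tax, open genus, its species words)."""
--     tax, genus, species = state
--     words = combined.split()
--     if len(words) == 2:
--         if words[0] != genus:
--             if genus is not None:
--                 tax = tax + [genus + ' ' + '/'.join(species)]
--             genus, species = words[0], []
--         return (tax, genus, species + [words[1]])
--     return (tax + [combined], genus, species)
--
--
-- def format_taxonomy(names, selectors, asterisk='*'):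
--     """
--     Single-pass rewrite: a dict ORs the selector flags per distinct name,
--     then one sweep over the sorted names emits non-species entries as-is
--     and folds runs of same-genus species into 'genus s1/s2/...'.
--     """
--     flag = {}
--     for i, n in enumerate(names):
--         s = bool(selectors[i]) if i < len(selectors) else False
--         flag[n] = flag.get(n, False) or s
--     state = ([], None, [])
--     for n in sorted(flag):
--         combined = n + (asterisk if flag[n] else '')
--         state = _sweep(state, combined)
--     tax, genus, species = state
--     if genus is not None:
--         tax = tax + [genus + ' ' + '/'.join(species)]
--     return ';'.join(sorted(tax))
-- ===== Notes on version B (the rewrite author's own statement) =====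
-- stated objective: simpler
-- what changed: Replaces A's zip_longest/set/sorted/double-groupby generator pipeline by one dict that ORs each name's selector flags and a single sweep over the sorted names with a running genus accumulator that folds same-genus species runs into 'genus s1/s2/...'.
import Mathlib
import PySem

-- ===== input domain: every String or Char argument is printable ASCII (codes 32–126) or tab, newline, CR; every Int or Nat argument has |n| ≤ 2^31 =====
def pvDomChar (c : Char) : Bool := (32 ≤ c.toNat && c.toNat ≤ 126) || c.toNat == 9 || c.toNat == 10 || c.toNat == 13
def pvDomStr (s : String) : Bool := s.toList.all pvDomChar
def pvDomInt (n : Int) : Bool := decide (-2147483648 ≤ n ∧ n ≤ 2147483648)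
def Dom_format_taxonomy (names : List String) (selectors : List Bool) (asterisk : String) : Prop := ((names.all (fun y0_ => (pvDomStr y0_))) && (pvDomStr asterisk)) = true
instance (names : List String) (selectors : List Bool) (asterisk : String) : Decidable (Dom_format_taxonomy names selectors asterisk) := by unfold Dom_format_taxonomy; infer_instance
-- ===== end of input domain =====

-- B replaces A's set/sort/double-groupby generator pipeline by one dict of OR'ed
-- selector flags and a single sweep over the sorted names with a running genus
-- accumulator (objective: simpler).

-- ===== PORT A =====
-- itertools.zip_longest(names, selectors): a missing selector is None (falsy).
-- When selectors is LONGER than names, Python pads names with None and A raises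
-- TypeError (None + str / unorderable tuples); those inputs are outside Pre_,
-- so the [] clause for names is only reached with an empty selector rest there.
def pvZipLongest : List (List Char) → List Bool → List (List Char × Bool)
  | [], _ => []
  | n :: ns, [] => (n, false) :: pvZipLongest ns []
  | n :: ns, s :: ss => (n, s) :: pvZipLongest ns ss

-- itertools.groupby(xs, key): consecutive elements with equal key, built by
-- structural recursion (the head element merges into the first group when keys match).
def pvGroupBy {α κ : Type} [DecidableEq κ] (key : α → κ) : List α → List (κ × List α)
  | [] => []
  | x :: xs =>
    match pvGroupBy key xs with
    | [] => [(key x, [x])]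
    | (k, g) :: rest =>
      if key x = k then (k, x :: g) :: rest else (key x, [x]) :: (k, g) :: rest

-- is_species(s): len(s.split()) == 2
def pvIsSpecies (s : List Char) : Bool := (PySem.Chars.split₀ s).length == 2

-- operator.itemgetter(0) on a split list (species lists have length 2; default unreachable)
def pvGenusOf (ws : List (List Char)) : List Char := PySem.List.pyGetD ws 0 ([] : List Char)

-- '{} {}'.format(k, '/'.join(map(itemgetter(1), g)))
def pvFmtGroup (kg : List Char × List (List (List Char))) : List Char :=
  kg.1 ++ [' '] ++ PySem.Chars.join ['/'] (kg.2.map (fun ws => PySem.List.pyGetD ws 1 ([] : List Char)))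

def format_taxonomy (names : List String) (selectors : List Bool) (asterisk : String) : String :=
  let ast := asterisk.toList
  let zipped := pvZipLongest (names.map String.toList) selectors
  let pairs := zipped.map (fun p => (p.1, if p.2 then ast else ([] : List Char)))
  let uniq := PySem.Set.ofList pairs
  let sortedPairs := PySem.List.sorted2 uniq Prod.fst Prod.snd
  let grouped := pvGroupBy Prod.fst sortedPairs
  -- list(g)[-1]: groupby groups are nonempty, the default is unreachable
  let lasts := grouped.map (fun g => PySem.List.pyGetD g.2 (-1) (([], []) : List Char × List Char))
  let combined := lasts.map (fun p => p.1 ++ p.2)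
  let bySpec := PySem.List.sorted combined pvIsSpecies
  let specGroups := pvGroupBy pvIsSpecies bySpec
  let tax := specGroups.foldl (fun tax g =>
    if g.1 then
      let splits := g.2.map PySem.Chars.split₀
      let genusGroups := pvGroupBy pvGenusOf splits
      tax ++ genusGroups.map pvFmtGroup
    else tax ++ g.2) []
  String.ofList (PySem.Chars.join [';'] (PySem.List.sorted tax (fun c => c)))

-- ===== PORT B =====
-- _sweep(state, combined): fold one combined name into (tax, open genus, species words)
def pvF2 (st : List (List Char) × Option (List Char) × List (List Char)) (combined : List Char) :
    List (List Char) × Option (List Char) × List (List Char) :=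
  let words := PySem.Chars.split₀ combined
  if words.length = 2 then
    let st :=
      if some (PySem.List.pyGetD words 0 ([] : List Char)) ≠ st.2.1 then
        (match st.2.1 with
         | some g0 => st.1 ++ [g0 ++ [' '] ++ PySem.Chars.join ['/'] st.2.2]
         | none => st.1,
         some (PySem.List.pyGetD words 0 ([] : List Char)), ([] : List (List Char)))
      else st
    (st.1, st.2.1, st.2.2 ++ [PySem.List.pyGetD words 1 ([] : List Char)])
  else (st.1 ++ [combined], st.2.1, st.2.2)

def format_taxonomy_alt (names : List String) (selectors : List Bool) (asterisk : String) : String :=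
  -- flag: name -> OR of its (bool-coerced, padded-with-False) selectors
  let flag := (PySem.List.enumerate names).foldl
    (fun d p =>
      let s := if p.1 < (selectors.length : Int) then PySem.List.pyGetD selectors p.1 false else false
      d.insert p.2.toList (d.getD p.2.toList false || s))
    (PySem.Dict.empty : PySem.Dict (List Char) Bool)
  -- one sweep over sorted(flag) with a running genus accumulator
  let fin := (PySem.List.sorted flag.keys (fun k => k)).foldl
    (fun (st : List (List Char) × Option (List Char) × List (List Char)) n =>
      let combined := n ++ (if flag.getD n false then asterisk.toList else [])
      pvF2 st combined)
    (([] : List (List Char)), (none : Option (List Char)), ([] : List (List Char)))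
  let tax := match fin.2.1 with
    | some g0 => fin.1 ++ [g0 ++ [' '] ++ PySem.Chars.join ['/'] fin.2.2]
    | none => fin.1
  String.ofList (PySem.Chars.join [';'] (PySem.List.sorted tax (fun c => c)))

-- ===== PRECONDITION & SPEC =====
-- Pre_ excludes only inputs with more selectors than names, on which A raises
-- TypeError (zip_longest pads the names with None).
def Pre_format_taxonomy (names : List String) (selectors : List Bool) (asterisk : String) : Prop :=
  selectors.length ≤ names.length
instance (names : List String) (selectors : List Bool) (asterisk : String) : Decidable (Pre_format_taxonomy names selectors asterisk) := by unfold Pre_format_taxonomy; infer_instance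

def pvWitness_format_taxonomy : List String × List Bool × String :=
  (["Homo sapiens", "Homo erectus", "Bacteria"], [true, false], "*")

def Spec_format_taxonomy (names : List String) (selectors : List Bool) (asterisk : String) (out : String) : Prop := out = format_taxonomy_alt names selectors asterisk
instance (names : List String) (selectors : List Bool) (asterisk : String) (out : String) : Decidable (Spec_format_taxonomy names selectors asterisk out) := by unfold Spec_format_taxonomy; infer_instance

-- ===== CLAIM (what is proved, stated in full; the proofs are below) =====
def Claim_equal_format_taxonomy : Prop := ∀ (names : List String) (selectors : List Bool) (asterisk : String), Dom_format_taxonomy names selectors asterisk → Pre_format_taxonomy names selectors asterisk → Spec_format_taxonomy names selectors asterisk (format_taxonomy names selectors asterisk)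

-- ===== LEMMAS AND PROOFS =====

-- Proof-side abbreviations -------------------------------------------------

-- the padded-selector pairs built by A's zip_longest+generator
def pvPairs (names : List String) (selectors : List Bool) (asterisk : String) :
    List (List Char × List Char) :=
  (pvZipLongest (names.map String.toList) selectors).map
    (fun p => (p.1, if p.2 then asterisk.toList else ([] : List Char)))

-- "some occurrence of this name has a truthy selector"
def pvAnyT (names : List String) (selectors : List Bool) (n : List Char) : Bool :=
  (pvZipLongest (names.map String.toList) selectors).any (fun q => q.1 == n && q.2)

-- the distinct names in sorted order
def pvDn (names : List String) : List (List Char) :=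
  PySem.List.sorted (PySem.Set.ofList (names.map String.toList)) (fun k => k)

-- name with its asterisk
def pvComb (names : List String) (selectors : List Bool) (asterisk : String) (n : List Char) :
    List Char :=
  n ++ (if pvAnyT names selectors n then asterisk.toList else [])

-- the combined (deduplicated, name-sorted) strings both programs process
def pvC (names : List String) (selectors : List Bool) (asterisk : String) : List (List Char) :=
  (pvDn names).map (pvComb names selectors asterisk)

-- formatted genus entries of a list of split species
def pvEntries (L : List (List (List Char))) : List (List Char) :=
  (pvGroupBy pvGenusOf L).map pvFmtGroup

-- the common tax multiset: non-species entries, then genus entries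
def pvTax (C : List (List Char)) : List (List Char) :=
  C.filter (fun c => !pvIsSpecies c) ++ pvEntries ((C.filter pvIsSpecies).map PySem.Chars.split₀)

-- B's open genus group, viewed as a pseudo species list
def pvStateList : Option (List Char) → List (List Char) → List (List (List Char))
  | none, _ => []
  | some g0, sp => sp.map (fun w => [g0, w])

-- B's final flush
def pvFlush (st : List (List Char) × Option (List Char) × List (List Char)) : List (List Char) :=
  match st.2.1 with
  | some g0 => st.1 ++ [g0 ++ [' '] ++ PySem.Chars.join ['/'] st.2.2]
  | none => st.1

-- lexicographic key on (name, asterisk) pairs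
def pvKeyL (a : List Char × List Char) : (List Char) ×ₗ (List Char) := toLex (a.1, a.2)

-- the block a distinct name contributes to sorted(set(pairs))
def pvFn (names : List String) (selectors : List Bool) (asterisk : String) (n : List Char) :
    List (List Char × List Char) :=
  if (n, ([] : List Char)) ∈ pvPairs names selectors asterisk ∧
      (n, asterisk.toList) ∈ pvPairs names selectors asterisk ∧ ([] : List Char) < asterisk.toList
  then [(n, []), (n, asterisk.toList)]
  else [(n, if (n, asterisk.toList) ∈ pvPairs names selectors asterisk then asterisk.toList else [])]

-- sorted(set(pairs)) written out block by block
def pvT (names : List String) (selectors : List Bool) (asterisk : String) :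
    List (List Char × List Char) :=
  (pvDn names).flatMap (pvFn names selectors asterisk)

-- `sorted` is its insertion fold -------------------------------------------

theorem pvSorted_def {α κ : Type} [LT κ] [DecidableLT κ] (xs : List α) (key : α → κ) :
    PySem.List.sorted xs key =
      xs.foldl (fun acc x => PySem.List.insertBy (fun a b => decide (key a < key b)) x acc) [] := rfl

theorem pvSorted2_def {α : Type} (xs : List (α × List Char)) (k1 : α × List Char → List Char)
    (k2 : α × List Char → List Char) :
    PySem.List.sorted2 xs k1 k2 =
      xs.foldl (fun acc x => PySem.List.insertBy
        (fun a b => (decide (k1 a < k1 b) || (!decide (k1 b < k1 a) && decide (k2 a < k2 b)))) x acc) [] := rfl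

theorem pvSorted_congr {α κ : Type} {i1 i2 : LT κ} {d1 : @DecidableLT κ i1} {d2 : @DecidableLT κ i2}
    (xs : List α) (key : α → κ)
    (h : ∀ a b : κ, @decide (@LT.lt κ i1 a b) (d1 a b) = @decide (@LT.lt κ i2 a b) (d2 a b)) :
    @PySem.List.sorted α κ i1 d1 xs key false = @PySem.List.sorted α κ i2 d2 xs key false := by
  rw [@pvSorted_def α κ i1 d1, @pvSorted_def α κ i2 d2]
  have hb : (fun (a b : α) => @decide (@LT.lt κ i1 (key a) (key b)) (d1 (key a) (key b)))
      = (fun (a b : α) => @decide (@LT.lt κ i2 (key a) (key b)) (d2 (key a) (key b))) := by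
    funext a b; exact h (key a) (key b)
  rw [hb]

theorem pvDecLC (a b : List Char) :
    decide (a < b) = @decide (@LT.lt _ List.instLinearOrder.toLT a b)
      (@LinearOrder.toDecidableLT _ List.instLinearOrder a b) := by
  apply Bool.eq_iff_iff.mpr; simp only [decide_eq_true_eq]

-- groupby -------------------------------------------------------------------

theorem pvGroupBy_head_key {α κ : Type} [DecidableEq κ] (key : α → κ) (x : α) (l : List α) :
    ∃ g rest, pvGroupBy key (x :: l) = (key x, g) :: rest := by
  show ∃ g rest, (match pvGroupBy key l with
    | [] => [(key x, [x])]
    | (k, g) :: rest => if key x = k then (k, x :: g) :: rest else (key x, [x]) :: (k, g) :: rest) = (key x, g) :: rest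
  rcases h : pvGroupBy key l with _ | ⟨⟨k, g⟩, rest⟩
  · exact ⟨[x], [], rfl⟩
  · by_cases hk : key x = k
    · exact ⟨x :: g, rest, by simp [hk]⟩
    · exact ⟨[x], (k, g) :: rest, by simp [hk]⟩

theorem pvGroupBy_block {α κ : Type} [DecidableEq κ] (key : α → κ) (k0 : κ) :
    ∀ (ys zs : List α), ys ≠ [] → (∀ y ∈ ys, key y = k0) →
      (zs = [] ∨ ∃ z zs', zs = z :: zs' ∧ key z ≠ k0) →
      pvGroupBy key (ys ++ zs) = (k0, ys) :: pvGroupBy key zs := by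
  intro ys
  induction ys with
  | nil => intro zs h; exact absurd rfl h
  | cons y ys ih =>
    intro zs _ hk hz
    have hy : key y = k0 := hk y (by simp)
    rcases eq_or_ne ys [] with rfl | hys
    · rcases hz with rfl | ⟨z, zs', rfl, hzk⟩
      · simp [pvGroupBy, hy]
      · obtain ⟨g, rest, hg⟩ := pvGroupBy_head_key key z zs'
        simp only [List.nil_append, List.cons_append]
        show (match pvGroupBy key (z :: zs') with
          | [] => [(key y, [y])]
          | (k, g) :: rest => if key y = k then (k, y :: g) :: rest else (key y, [y]) :: (k, g) :: rest) = _
        rw [hg]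
        have hzk' : k0 ≠ key z := fun h => hzk h.symm
        simp [hy, hzk', ← hg]
    · have := ih zs hys (fun a ha => hk a (by simp [ha])) hz
      show (match pvGroupBy key (ys ++ zs) with
        | [] => [(key y, [y])]
        | (k, g) :: rest => if key y = k then (k, y :: g) :: rest else (key y, [y]) :: (k, g) :: rest) = _
      rw [this]
      simp [hy]

theorem pvGroupBy_flatMap {α κ : Type} [DecidableEq κ] (key : α → κ) (f : κ → List α) :
    ∀ ks : List κ, ks.Pairwise (· ≠ ·) → (∀ n ∈ ks, f n ≠ [] ∧ ∀ p ∈ f n, key p = n) →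
      pvGroupBy key (ks.flatMap f) = ks.map (fun n => (n, f n)) := by
  intro ks
  induction ks with
  | nil => intro _ _; simp [pvGroupBy]
  | cons n ks ih =>
    intro hp hf
    rw [List.flatMap_cons]
    have hrest : pvGroupBy key (ks.flatMap f) = ks.map (fun n => (n, f n)) :=
      ih hp.of_cons (fun m hm => hf m (by simp [hm]))
    rw [pvGroupBy_block key n (f n) (ks.flatMap f) (hf n (by simp)).1
      (fun p hp' => (hf n (by simp)).2 p hp')]
    · rw [hrest]; simp
    · rcases h : ks.flatMap f with _ | ⟨z, zs'⟩
      · exact Or.inl rfl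
      · refine Or.inr ⟨z, zs', rfl, ?_⟩
        have hz : z ∈ ks.flatMap f := by rw [h]; simp
        obtain ⟨m, hm, hzm⟩ := List.mem_flatMap.mp hz
        rw [(hf m (by simp [hm])).2 z hzm]
        exact fun hmn => (List.pairwise_cons.mp hp).1 m hm hmn.symm

-- stable sort by a Bool key = partition -------------------------------------

theorem pvInsertBy_all_false {α : Type} (before : α → α → Bool) (x : α) :
    ∀ l, (∀ y ∈ l, before x y = false) → PySem.List.insertBy before x l = l ++ [x] := by
  intro l
  induction l with
  | nil => intro _; rfl
  | cons y l ih =>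
    intro h
    show (if before x y = true then x :: y :: l else y :: PySem.List.insertBy before x l) = _
    rw [h y (by simp), if_neg (by simp), ih (fun z hz => h z (by simp [hz]))]
    rfl

theorem pvInsertBy_mid {α : Type} (before : α → α → Bool) (x : α) :
    ∀ u, ∀ z v, (∀ y ∈ u, before x y = false) → before x z = true →
      PySem.List.insertBy before x (u ++ z :: v) = u ++ x :: z :: v := by
  intro u
  induction u with
  | nil => intro z v _ hz; show (if before x z = true then _ else _) = _; rw [if_pos hz]; rfl
  | cons y u ih =>
    intro z v h hz
    show (if before x y = true then x :: (y :: u ++ z :: v) else y :: PySem.List.insertBy before x (u ++ z :: v)) = _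
    rw [h y (by simp), if_neg (by simp), ih z v (fun w hw => h w (by simp [hw])) hz]
    rfl

theorem pvSortBool {α : Type} (key : α → Bool) :
    ∀ (xs u v : List α), (∀ y ∈ u, key y = false) → (∀ y ∈ v, key y = true) →
      xs.foldl (fun acc x => PySem.List.insertBy (fun a b => decide (key a < key b)) x acc) (u ++ v)
        = (u ++ xs.filter (fun x => !key x)) ++ (v ++ xs.filter key) := by
  intro xs
  induction xs with
  | nil => intro u v _ _; simp
  | cons x xs ih =>
    intro u v hu hv
    rw [List.foldl_cons]
    by_cases hx : key x = true
    · have hins : PySem.List.insertBy (fun a b => decide (key a < key b)) x (u ++ v) = (u ++ v) ++ [x] := by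
        apply pvInsertBy_all_false
        intro y hy
        rcases List.mem_append.mp hy with h | h
        · rw [hu y h, hx]; decide
        · rw [hv y h, hx]; decide
      rw [hins, List.append_assoc, ih u (v ++ [x]) hu (by intro y hy; rcases List.mem_append.mp hy with h | h; exact hv y h; simp at h; rw [h, hx])]
      simp [List.filter_cons, hx]
    · have hx' : key x = false := by simpa using hx
      have hins : PySem.List.insertBy (fun a b => decide (key a < key b)) x (u ++ v) = (u ++ [x]) ++ v := by
        rcases v with _ | ⟨z, v'⟩
        · rw [List.append_nil, List.append_nil]
          apply pvInsertBy_all_false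
          intro y hy; rw [hu y hy, hx']; decide
        · rw [pvInsertBy_mid _ x u z v' (fun y hy => by rw [hu y hy, hx']; decide)
            (by rw [hv z (by simp), hx']; decide)]
          simp
      rw [hins, ih (u ++ [x]) v (by intro y hy; rcases List.mem_append.mp hy with h | h; exact hu y h; simp at h; rw [h, hx']) hv]
      simp [List.filter_cons, hx']

theorem pvSorted_bool {α : Type} (key : α → Bool) (xs : List α) :
    PySem.List.sorted xs key = xs.filter (fun x => !key x) ++ xs.filter key := by
  have h := pvSortBool key xs [] [] (by simp) (by simp)
  simpa [pvSorted_def] using h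

-- membership facts ----------------------------------------------------------

theorem pvZip_mem : ∀ (ns : List (List Char)) (ss : List Bool), ss.length ≤ ns.length →
    ∀ x : List Char × Bool,
      (x ∈ pvZipLongest ns ss ↔ ∃ k, ns[k]? = some x.1 ∧ ss.getD k false = x.2) := by
  intro ns
  induction ns with
  | nil =>
    intro ss hss x
    have : ss = [] := by cases ss <;> simp_all
    subst this
    simp [pvZipLongest]
  | cons n ns ih =>
    intro ss hss x
    rcases ss with _ | ⟨s, ss⟩
    · rw [show pvZipLongest (n :: ns) [] = (n, false) :: pvZipLongest ns [] from rfl]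
      constructor
      · intro h
        rcases List.mem_cons.mp h with rfl | h
        · exact ⟨0, by simp⟩
        · obtain ⟨k, hk1, hk2⟩ := (ih [] (by simp) x).mp h
          exact ⟨k + 1, by simpa using hk1, by simpa using hk2⟩
      · rintro ⟨k, hk1, hk2⟩
        rcases k with _ | k
        · rcases x with ⟨x1, x2⟩
          have hx : (x1, x2) = (n, false) := by simp_all
          rw [hx]; simp
        · right
          exact (ih [] (by simp) x).mpr ⟨k, by simpa using hk1, by simpa using hk2⟩
    · rw [show pvZipLongest (n :: ns) (s :: ss) = (n, s) :: pvZipLongest ns ss from rfl]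
      constructor
      · intro h
        rcases List.mem_cons.mp h with rfl | h
        · exact ⟨0, by simp⟩
        · obtain ⟨k, hk1, hk2⟩ := (ih ss (by simpa using hss) x).mp h
          exact ⟨k + 1, by simpa using hk1, by simpa using hk2⟩
      · rintro ⟨k, hk1, hk2⟩
        rcases k with _ | k
        · rcases x with ⟨x1, x2⟩
          have hx : (x1, x2) = (n, s) := by simp_all
          rw [hx]; simp
        · right
          exact (ih ss (by simpa using hss) x).mpr ⟨k, by simpa using hk1, by simpa using hk2⟩

theorem pvZipAny_iff (n : List Char) : ∀ (ns : List (List Char)) (ss : List Bool),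
    ((pvZipLongest ns ss).any (fun q => q.1 == n && q.2)) = true ↔
      ∃ k, ns[k]? = some n ∧ ss.getD k false = true := by
  intro ns
  induction ns with
  | nil => intro ss; simp [pvZipLongest]
  | cons m ns ih =>
    intro ss
    rcases ss with _ | ⟨s, ss⟩
    · rw [show pvZipLongest (m :: ns) [] = (m, false) :: pvZipLongest ns [] from rfl]
      rw [List.any_cons]
      simp only [Bool.or_eq_true]
      rw [ih []]
      constructor
      · rintro (h | ⟨k, hk1, hk2⟩)
        · simp at h
        · exact ⟨k + 1, by simpa using hk1, by simpa using hk2⟩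
      · rintro ⟨k, hk1, hk2⟩
        rcases k with _ | k
        · simp at hk2
        · exact Or.inr ⟨k, by simpa using hk1, by simpa using hk2⟩
    · rw [show pvZipLongest (m :: ns) (s :: ss) = (m, s) :: pvZipLongest ns ss from rfl]
      rw [List.any_cons]
      simp only [Bool.or_eq_true]
      rw [ih ss]
      constructor
      · rintro (h | ⟨k, hk1, hk2⟩)
        · simp at h
          exact ⟨0, by simp [h.1], by simp [h.2]⟩
        · exact ⟨k + 1, by simpa using hk1, by simpa using hk2⟩
      · rintro ⟨k, hk1, hk2⟩
        rcases k with _ | k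
        · simp at hk1 hk2
          exact Or.inl (by simp [hk1, hk2])
        · exact Or.inr ⟨k, by simpa using hk1, by simpa using hk2⟩

theorem pvPairs_mem (names : List String) (selectors : List Bool) (asterisk : String)
    (hpre : selectors.length ≤ names.length) (x : List Char × List Char) :
    x ∈ pvPairs names selectors asterisk ↔
      ∃ k, (names.map String.toList)[k]? = some x.1 ∧
        x.2 = (if selectors.getD k false then asterisk.toList else []) := by
  have hlen : selectors.length ≤ (names.map String.toList).length := by simpa using hpre
  unfold pvPairs
  rw [List.mem_map]
  constructor
  · rintro ⟨q, hq, rfl⟩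
    obtain ⟨k, hk1, hk2⟩ := (pvZip_mem (names.map String.toList) selectors hlen q).mp hq
    exact ⟨k, hk1, by rw [hk2]⟩
  · rintro ⟨k, hk1, hk2⟩
    refine ⟨(x.1, selectors.getD k false),
      (pvZip_mem (names.map String.toList) selectors hlen _).mpr ⟨k, hk1, rfl⟩, ?_⟩
    rcases x with ⟨x1, x2⟩
    simp only at hk2 ⊢
    rw [← hk2]

theorem pvLastVal (names : List String) (selectors : List Bool) (asterisk : String)
    (hpre : selectors.length ≤ names.length) (n : List Char) :
    (if (n, asterisk.toList) ∈ pvPairs names selectors asterisk then asterisk.toList else [])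
      = (if pvAnyT names selectors n then asterisk.toList else []) := by
  by_cases hast : asterisk.toList = []
  · rw [hast]; simp
  · have hmem : ((n, asterisk.toList) ∈ pvPairs names selectors asterisk) ↔
        pvAnyT names selectors n = true := by
      rw [pvPairs_mem names selectors asterisk hpre]
      unfold pvAnyT
      rw [pvZipAny_iff]
      constructor
      · rintro ⟨k, hk1, hk2⟩
        refine ⟨k, hk1, ?_⟩
        by_cases hs : selectors.getD k false = true
        · exact hs
        · simp only [Bool.not_eq_true] at hs
          rw [hs] at hk2
          simp only [Bool.false_eq_true, if_false] at hk2
          exact absurd hk2 hast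
      · rintro ⟨k, hk1, hk2⟩
        exact ⟨k, hk1, by rw [hk2]; simp⟩
    by_cases h : pvAnyT names selectors n = true
    · rw [if_pos (hmem.mpr h), if_pos h]
    · rw [if_neg (fun hm => h (hmem.mp hm)), if_neg h]

-- B's flag dict -------------------------------------------------------------

theorem pvDictOr_getD (f : Int × String → Bool) :
    ∀ (l : List (Int × String)) (d : PySem.Dict (List Char) Bool) (m : List Char),
      ((l.foldl (fun d p => d.insert p.2.toList (d.getD p.2.toList false || f p)) d).getD m false)
        = (d.getD m false || l.any (fun p => p.2.toList == m && f p)) := by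
  intro l
  induction l with
  | nil => intro d m; simp
  | cons p l ih =>
    intro d m
    rw [List.foldl_cons, ih, List.any_cons]
    by_cases h : m = p.2.toList
    · subst h
      rw [PySem.Dict.getD_insert]
      simp [Bool.or_assoc]
    · rw [PySem.Dict.getD_insert, if_neg h]
      have : (p.2.toList == m) = false := by simpa using fun hh => h hh.symm
      simp [this]


theorem pvEnumAny (names : List String) (selectors : List Bool) (m : List Char) :
    ∀ s0 : Nat,
      ((PySem.List.enumerate names (s0 : Int)).any (fun p => p.2.toList == m &&
          (if p.1 < (selectors.length : Int) then PySem.List.pyGetD selectors p.1 false else false))) = true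
        ↔ ∃ k, names[k]?.map String.toList = some m ∧ selectors.getD (s0 + k) false = true := by
  induction names with
  | nil => intro s0; simp [PySem.List.enumerate]
  | cons x t ih =>
    intro s0
    rw [PySem.List.enumerate_cons, List.any_cons]
    simp only [Bool.or_eq_true]
    have hc : ((s0 : Int) + 1) = ((s0 + 1 : Nat) : Int) := by push_cast; ring
    rw [hc, ih (s0 + 1)]
    have hs : (if (s0 : Int) < (selectors.length : Int) then PySem.List.pyGetD selectors (s0 : Int) false else false) = selectors.getD s0 false := by
      split_ifs with h
      · simp [PySem.List.pyGetD_natCast]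
      · rw [List.getD_eq_default]; omega
    constructor
    · rintro (h | ⟨k, hk1, hk2⟩)
      · simp only [Bool.and_eq_true, beq_iff_eq] at h
        refine ⟨0, by simp [h.1], ?_⟩
        rw [hs] at h
        simpa using h.2
      · exact ⟨k + 1, by simpa using hk1, by rw [show s0 + (k + 1) = s0 + 1 + k by omega]; exact hk2⟩
    · rintro ⟨k, hk1, hk2⟩
      rcases k with _ | k
      · simp at hk1
        left
        simp only [Bool.and_eq_true, beq_iff_eq]
        refine ⟨by simp [hk1], ?_⟩
        rw [hs]
        simpa using hk2
      · exact Or.inr ⟨k, by simpa using hk1, by rw [show s0 + 1 + k = s0 + (k + 1) by omega]; exact hk2⟩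

theorem pvFlagB (names : List String) (selectors : List Bool) (m : List Char) :
    ((PySem.List.enumerate names 0).foldl
        (fun d p => d.insert p.2.toList (d.getD p.2.toList false ||
          (if p.1 < (selectors.length : Int) then PySem.List.pyGetD selectors p.1 false else false)))
        PySem.Dict.empty).getD m false = pvAnyT names selectors m := by
  rw [pvDictOr_getD (fun p => if p.1 < (selectors.length : Int)
      then PySem.List.pyGetD selectors p.1 false else false)]
  rw [PySem.Dict.getD_empty]
  rw [Bool.false_or]
  apply Bool.eq_iff_iff.mpr
  have h0 := pvEnumAny names selectors m 0
  rw [Nat.cast_zero] at h0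
  rw [h0]
  unfold pvAnyT
  rw [pvZipAny_iff]
  apply exists_congr
  intro k
  simp [List.getElem?_map]

theorem pvFlagKeys (names : List String) (selectors : List Bool) :
    ((PySem.List.enumerate names 0).foldl
        (fun d p => d.insert p.2.toList (d.getD p.2.toList false ||
          (if p.1 < (selectors.length : Int) then PySem.List.pyGetD selectors p.1 false else false)))
        (PySem.Dict.empty : PySem.Dict (List Char) Bool)).keys
      = PySem.Set.ofList (names.map String.toList) := by
  rw [PySem.Dict.keys_foldl_insert_key (PySem.List.enumerate names 0) (fun p => p.2.toList)
    (fun d p => d.getD p.2.toList false ||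
      (if p.1 < (selectors.length : Int) then PySem.List.pyGetD selectors p.1 false else false))
    PySem.Dict.empty]
  rw [PySem.Dict.keys_empty, PySem.Set.update_nil_left]
  congr 1
  have h1 : (PySem.List.enumerate names 0).map (fun p => p.2.toList)
      = ((PySem.List.enumerate names 0).map (fun p => p.2)).map String.toList := by
    rw [List.map_map]
    rfl
  rw [h1, PySem.List.map_snd_enumerate]

-- the sorted set of pairs, block by block ------------------------------------

theorem pvNil_lt_iff (l : List Char) : (([] : List Char) < l) ↔ l ≠ [] := by
  rcases l with _ | ⟨c, l⟩
  · simp [lt_irrefl]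
  · constructor
    · intro _; simp
    · intro _; exact List.Lex.nil

theorem pvFn_ne (names : List String) (selectors : List Bool) (asterisk : String) (n : List Char) :
    pvFn names selectors asterisk n ≠ [] := by
  unfold pvFn; split <;> simp

theorem pvFn_fst (names : List String) (selectors : List Bool) (asterisk : String) (n : List Char) :
    ∀ p ∈ pvFn names selectors asterisk n, p.1 = n := by
  unfold pvFn; split <;> simp

theorem pvDn_mem (names : List String) (n : List Char) :
    n ∈ pvDn names ↔ n ∈ names.map String.toList := by
  unfold pvDn; rw [PySem.List.mem_sorted]; exact PySem.Set.mem_ofList _ _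

theorem pvDn_pairwise (names : List String) : (pvDn names).Pairwise (· < ·) := by
  have h := PySem.List.sorted_ofList_pairwise_lt (κ := List Char) (names.map String.toList)
  unfold pvDn
  rw [pvSorted_congr _ _ (fun a b => pvDecLC a b)]
  exact h

theorem pvT_mem (names : List String) (selectors : List Bool) (asterisk : String)
    (hpre : selectors.length ≤ names.length) (x : List Char × List Char) :
    x ∈ pvT names selectors asterisk ↔ x ∈ pvPairs names selectors asterisk := by
  unfold pvT
  rw [List.mem_flatMap]
  constructor
  · rintro ⟨n, hn, hx⟩
    have hnm : n ∈ names.map String.toList := (pvDn_mem names n).mp hn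
    unfold pvFn at hx
    split at hx
    next h =>
      rcases List.mem_cons.mp hx with rfl | hx
      · exact h.1
      · rcases List.mem_cons.mp hx with rfl | hx
        · exact h.2.1
        · simp at hx
    next h =>
      by_cases hm : (n, asterisk.toList) ∈ pvPairs names selectors asterisk
      · rw [if_pos hm] at hx
        rcases List.mem_cons.mp hx with rfl | hx
        · exact hm
        · simp at hx
      · rw [if_neg hm] at hx
        rcases List.mem_cons.mp hx with rfl | hx
        · obtain ⟨k, hk⟩ := List.mem_iff_getElem?.mp hnm
          by_cases hs : selectors.getD k false = true
          · exact absurd ((pvPairs_mem names selectors asterisk hpre _).mpr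
              ⟨k, hk, by rw [hs]; simp⟩) hm
          · simp only [Bool.not_eq_true] at hs
            exact (pvPairs_mem names selectors asterisk hpre _).mpr
              ⟨k, hk, by rw [hs]; simp⟩
        · simp at hx
  · intro hx
    obtain ⟨k, hk1, hk2⟩ := (pvPairs_mem names selectors asterisk hpre x).mp hx
    have hn : x.1 ∈ names.map String.toList := List.mem_iff_getElem?.mpr ⟨k, hk1⟩
    refine ⟨x.1, (pvDn_mem names x.1).mpr hn, ?_⟩
    unfold pvFn
    split
    case isTrue h =>
      by_cases hs : selectors.getD k false = true
      · rw [hs] at hk2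
        simp only [if_pos] at hk2
        have : x = (x.1, asterisk.toList) := by rw [← hk2]
        rw [this]; simp
      · simp only [Bool.not_eq_true] at hs
        rw [hs] at hk2
        simp only [Bool.false_eq_true, if_false] at hk2
        have : x = (x.1, ([] : List Char)) := by rw [← hk2]
        rw [this]; simp
    case isFalse h =>
      by_cases hm : (x.1, asterisk.toList) ∈ pvPairs names selectors asterisk
      · rw [if_pos hm]
        by_cases hs : selectors.getD k false = true
        · rw [hs] at hk2
          simp only [if_pos] at hk2
          have : x = (x.1, asterisk.toList) := by rw [← hk2]
          rw [this]; simp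
        · simp only [Bool.not_eq_true] at hs
          rw [hs] at hk2
          simp only [Bool.false_eq_true, if_false] at hk2
          have hx0 : x = (x.1, ([] : List Char)) := by rw [← hk2]
          rw [hx0] at hx
          have hastnil : asterisk.toList = [] := by
            by_contra hne
            exact h ⟨hx, hm, (pvNil_lt_iff _).mpr hne⟩
          rw [hx0, hastnil]; simp
      · rw [if_neg hm]
        by_cases hs : selectors.getD k false = true
        · rw [hs] at hk2
          simp only [if_pos] at hk2
          have : x = (x.1, asterisk.toList) := by rw [← hk2]
          rw [← this] at hm
          exact absurd hx hm
        · simp only [Bool.not_eq_true] at hs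
          rw [hs] at hk2
          simp only [Bool.false_eq_true, if_false] at hk2
          have : x = (x.1, ([] : List Char)) := by rw [← hk2]
          rw [this]; simp

theorem pvPairwise_flatMap {α κ : Type} (R : α → α → Prop) (f : κ → List α) :
    ∀ ks : List κ, ks.Pairwise (fun a b => ∀ p ∈ f a, ∀ q ∈ f b, R p q) →
      (∀ n ∈ ks, (f n).Pairwise R) → (ks.flatMap f).Pairwise R := by
  intro ks
  induction ks with
  | nil => intro _ _; simp
  | cons n ks ih =>
    intro hp hin
    rw [List.flatMap_cons, List.pairwise_append]
    refine ⟨hin n (by simp), ih hp.of_cons (fun m hm => hin m (by simp [hm])), ?_⟩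
    intro p hp' q hq
    obtain ⟨m, hm, hqm⟩ := List.mem_flatMap.mp hq
    exact (List.pairwise_cons.mp hp).1 m hm p hp' q hqm

theorem pvT_pairwise (names : List String) (selectors : List Bool) (asterisk : String) :
    (pvT names selectors asterisk).Pairwise (fun a b => pvKeyL a < pvKeyL b) := by
  unfold pvT
  apply pvPairwise_flatMap
  · apply (pvDn_pairwise names).imp
    intro a b hab p hp q hq
    have h1 : p.1 = a := pvFn_fst names selectors asterisk a p hp
    have h2 : q.1 = b := pvFn_fst names selectors asterisk b q hq
    exact Prod.Lex.toLex_lt_toLex.mpr (Or.inl (by rw [h1, h2]; exact hab))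
  · intro n _
    unfold pvFn
    split
    next h =>
      refine List.pairwise_cons.mpr ⟨?_, by simp⟩
      intro q hq
      rcases List.mem_cons.mp hq with rfl | hq
      · exact Prod.Lex.toLex_lt_toLex.mpr (Or.inr ⟨rfl, h.2.2⟩)
      · simp at hq
    next h => simp

theorem pvT_nodup (names : List String) (selectors : List Bool) (asterisk : String) :
    (pvT names selectors asterisk).Nodup :=
  (pvT_pairwise names selectors asterisk).imp
    (fun hlt heq => absurd (heq ▸ hlt) (lt_irrefl _))

theorem pvT_perm (names : List String) (selectors : List Bool) (asterisk : String)
    (hpre : selectors.length ≤ names.length) :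
    (pvT names selectors asterisk).Perm (PySem.Set.ofList (pvPairs names selectors asterisk)) := by
  refine (List.perm_ext_iff_of_nodup (pvT_nodup names selectors asterisk)
    (PySem.Set.nodup_ofList _)).mpr ?_
  intro a
  rw [PySem.Set.mem_ofList]
  exact pvT_mem names selectors asterisk hpre a

theorem pvSorted2_eq_lex (xs : List (List Char × List Char)) :
    PySem.List.sorted2 xs Prod.fst Prod.snd = PySem.List.sorted xs pvKeyL := by
  rw [pvSorted2_def, pvSorted_def]
  have hb : (fun (a b : List Char × List Char) =>
        (decide (Prod.fst a < Prod.fst b) ||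
          (!decide (Prod.fst b < Prod.fst a) && decide (Prod.snd a < Prod.snd b))))
      = (fun (a b : List Char × List Char) => decide (pvKeyL a < pvKeyL b)) := by
    funext a b
    apply Bool.eq_iff_iff.mpr
    simp only [Bool.or_eq_true, Bool.and_eq_true, Bool.not_eq_eq_eq_not, Bool.not_true,
      decide_eq_true_eq, decide_eq_false_iff_not]
    rw [show pvKeyL a < pvKeyL b ↔ a.1 < b.1 ∨ a.1 = b.1 ∧ a.2 < b.2 from Prod.Lex.toLex_lt_toLex]
    constructor
    · rintro (h | ⟨h1, h2⟩)
      · exact Or.inl h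
      · rcases lt_trichotomy a.1 b.1 with h | h | h
        · exact Or.inl h
        · exact Or.inr ⟨h, h2⟩
        · exact absurd h h1
    · rintro (h | ⟨h1, h2⟩)
      · exact Or.inl h
      · exact Or.inr ⟨by rw [h1]; exact lt_irrefl _, h2⟩
  rw [hb]

theorem pvSortedPairs (names : List String) (selectors : List Bool) (asterisk : String)
    (hpre : selectors.length ≤ names.length) :
    PySem.List.sorted2 (PySem.Set.ofList (pvPairs names selectors asterisk)) Prod.fst Prod.snd
      = pvT names selectors asterisk := by
  rw [pvSorted2_eq_lex]
  exact PySem.List.sorted_eq_of_perm_of_pairwise_lt _ _ pvKeyL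
    (pvT_perm names selectors asterisk hpre) (pvT_pairwise names selectors asterisk)

theorem pvCombined_eq (names : List String) (selectors : List Bool) (asterisk : String)
    (hpre : selectors.length ≤ names.length) :
    ((pvGroupBy Prod.fst (PySem.List.sorted2 (PySem.Set.ofList (pvPairs names selectors asterisk))
        Prod.fst Prod.snd)).map
      (fun g => PySem.List.pyGetD g.2 (-1) (([], []) : List Char × List Char))).map
        (fun p => p.1 ++ p.2)
      = pvC names selectors asterisk := by
  rw [pvSortedPairs names selectors asterisk hpre]
  unfold pvT
  rw [pvGroupBy_flatMap Prod.fst (pvFn names selectors asterisk) (pvDn names)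
    ((pvDn_pairwise names).imp (fun hab => ne_of_lt hab))
    (fun n _ => ⟨pvFn_ne names selectors asterisk n, pvFn_fst names selectors asterisk n⟩)]
  rw [List.map_map, List.map_map]
  unfold pvC
  apply List.map_congr_left
  intro n _
  simp only [Function.comp]
  unfold pvComb pvFn
  split
  case isTrue h =>
    have hg : PySem.List.pyGetD [(n, ([] : List Char)), (n, asterisk.toList)] (-1)
        (([], []) : List Char × List Char) = (n, asterisk.toList) := rfl
    rw [hg]
    rw [← pvLastVal names selectors asterisk hpre n, if_pos h.2.1]
  case isFalse h =>
    have hg : PySem.List.pyGetD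
        [(n, if (n, asterisk.toList) ∈ pvPairs names selectors asterisk then asterisk.toList else [])]
        (-1) (([], []) : List Char × List Char)
        = (n, if (n, asterisk.toList) ∈ pvPairs names selectors asterisk then asterisk.toList else []) := rfl
    rw [hg]
    rw [← pvLastVal names selectors asterisk hpre n]

-- A's back end ---------------------------------------------------------------

theorem pvEntries_nil : pvEntries [] = [] := by
  unfold pvEntries pvGroupBy; simp

theorem pvTaxA (C : List (List Char)) :
    (pvGroupBy pvIsSpecies (PySem.List.sorted C pvIsSpecies)).foldl
      (fun tax g =>
        if g.1 then
          tax ++ (pvGroupBy pvGenusOf (g.2.map PySem.Chars.split₀)).map pvFmtGroup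
        else tax ++ g.2) []
      = pvTax C := by
  rw [pvSorted_bool]
  have hFk : ∀ y ∈ C.filter (fun c => !pvIsSpecies c), pvIsSpecies y = false := by
    intro y hy
    have := List.of_mem_filter hy
    simpa using this
  have hTk : ∀ y ∈ C.filter pvIsSpecies, pvIsSpecies y = true := by
    intro y hy
    exact List.of_mem_filter hy
  unfold pvTax
  by_cases hFe : C.filter (fun c => !pvIsSpecies c) = []
  · rw [hFe, List.nil_append, List.nil_append]
    by_cases hTe : C.filter pvIsSpecies = []
    · rw [hTe]
      show List.foldl _ [] (pvGroupBy pvIsSpecies []) = pvEntries ([].map PySem.Chars.split₀)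
      rw [show pvGroupBy pvIsSpecies ([] : List (List Char)) = [] from rfl]
      rw [List.foldl_nil, List.map_nil, pvEntries_nil]
    · have hb := pvGroupBy_block pvIsSpecies true (C.filter pvIsSpecies) [] hTe hTk (Or.inl rfl)
      rw [List.append_nil] at hb
      rw [hb, List.foldl_cons]
      rw [show pvGroupBy pvIsSpecies ([] : List (List Char)) = [] from rfl]
      rw [List.foldl_nil]
      simp only [if_pos rfl, List.nil_append]
      rfl
  · have hz : C.filter pvIsSpecies = [] ∨
        ∃ z zs', C.filter pvIsSpecies = z :: zs' ∧ pvIsSpecies z ≠ false := by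
      rcases h : C.filter pvIsSpecies with _ | ⟨z, zs'⟩
      · exact Or.inl rfl
      · exact Or.inr ⟨z, zs', rfl, by rw [hTk z (by rw [h]; simp)]; simp⟩
    rw [pvGroupBy_block pvIsSpecies false _ _ hFe hFk hz, List.foldl_cons]
    simp only [Bool.false_eq_true, if_false, List.nil_append]
    by_cases hTe : C.filter pvIsSpecies = []
    · rw [hTe]
      rw [show pvGroupBy pvIsSpecies ([] : List (List Char)) = [] from rfl]
      rw [List.foldl_nil, List.map_nil, pvEntries_nil, List.append_nil]
    · have hb := pvGroupBy_block pvIsSpecies true (C.filter pvIsSpecies) [] hTe hTk (Or.inl rfl)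
      rw [List.append_nil] at hb
      rw [hb, List.foldl_cons]
      rw [show pvGroupBy pvIsSpecies ([] : List (List Char)) = [] from rfl]
      rw [List.foldl_nil]
      simp only [if_pos rfl]
      rfl

-- B's back end ---------------------------------------------------------------

theorem pvWords_two (ws : List (List Char)) (h : ws.length = 2) :
    ws = [PySem.List.pyGetD ws 0 ([] : List Char), PySem.List.pyGetD ws 1 ([] : List Char)] := by
  match ws, h with
  | [a, b], _ => rfl

theorem pvEntries_block (g0 : List Char) (sp : List (List Char)) (hsp : sp ≠ [])
    (zs : List (List (List Char))) (hz : zs = [] ∨ ∃ z zs', zs = z :: zs' ∧ pvGenusOf z ≠ g0) :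
    pvEntries (sp.map (fun w => [g0, w]) ++ zs)
      = (g0 ++ [' '] ++ PySem.Chars.join ['/'] sp) :: pvEntries zs := by
  unfold pvEntries
  rw [pvGroupBy_block pvGenusOf g0 (sp.map fun w => [g0, w]) zs (by simpa using hsp)
    (by rintro y hy; obtain ⟨w, _, rfl⟩ := List.mem_map.mp hy; rfl) hz]
  rw [List.map_cons]
  congr 1
  unfold pvFmtGroup
  simp only [List.map_map]
  have hmap : (sp.map ((fun ws => PySem.List.pyGetD ws 1 ([] : List Char)) ∘ fun w => [g0, w]))
      = sp := by
    have : ((fun ws => PySem.List.pyGetD ws 1 ([] : List Char)) ∘ fun w : List Char => [g0, w])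
        = id := by funext w; rfl
    rw [this, List.map_id]
  rw [hmap]

theorem pvPermShift {α : Type} (t X E : List α) (e : α) :
    ((t ++ [e]) ++ X ++ E).Perm (t ++ X ++ (e :: E)) := by
  have h1 : (t ++ [e]) ++ X ++ E = (t ++ ([e] ++ X)) ++ E := by simp [List.append_assoc]
  have h2 : t ++ X ++ (e :: E) = (t ++ (X ++ [e])) ++ E := by simp [List.append_assoc]
  rw [h1, h2]
  exact List.Perm.append_right E (List.Perm.append_left t List.perm_append_comm)

theorem pvMainB (names : List String) (selectors : List Bool) (asterisk : String) :
    ∀ (C : List (List Char)) (t : List (List Char)) (g : Option (List Char)) (sp : List (List Char)),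
      (∀ g0, g = some g0 → sp ≠ []) →
      (pvFlush (C.foldl pvF2 (t, g, sp))).Perm
        (t ++ C.filter (fun c => !pvIsSpecies c) ++
          pvEntries (pvStateList g sp ++ (C.filter pvIsSpecies).map PySem.Chars.split₀)) := by
  intro C
  induction C with
  | nil =>
    intro t g sp hwf
    rcases g with _ | g0
    · simp only [List.foldl_nil, List.filter_nil, List.map_nil, List.append_nil]
      rw [show pvStateList none sp = [] from rfl, pvEntries_nil, List.append_nil]
      exact List.Perm.refl _
    · have hsp := hwf g0 rfl
      simp only [List.foldl_nil, List.filter_nil, List.map_nil, List.append_nil]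
      rw [show pvStateList (some g0) sp = sp.map (fun w => [g0, w]) from rfl]
      have hb := pvEntries_block g0 sp hsp [] (Or.inl rfl)
      rw [List.append_nil] at hb
      rw [hb, pvEntries_nil]
      show (t ++ [g0 ++ [' '] ++ PySem.Chars.join ['/'] sp]).Perm _
      exact List.Perm.refl _
  | cons c C ih =>
    intro t g sp hwf
    rw [List.foldl_cons]
    by_cases hs : (PySem.Chars.split₀ c).length = 2
    · have hspecT : pvIsSpecies c = true := by unfold pvIsSpecies; simp [hs]
      have hsplit : PySem.Chars.split₀ c
          = [PySem.List.pyGetD (PySem.Chars.split₀ c) 0 ([] : List Char),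
             PySem.List.pyGetD (PySem.Chars.split₀ c) 1 ([] : List Char)] := pvWords_two _ hs
      have hf1 : (c :: C).filter (fun c => !pvIsSpecies c) = C.filter (fun c => !pvIsSpecies c) := by
        simp [hspecT]
      have hf2 : ((c :: C).filter pvIsSpecies).map PySem.Chars.split₀
          = PySem.Chars.split₀ c :: (C.filter pvIsSpecies).map PySem.Chars.split₀ := by
        simp [hspecT]
      rw [hf1, hf2]
      rcases g with _ | g0
      · have hstep : pvF2 (t, none, sp) c
            = (t, some (PySem.List.pyGetD (PySem.Chars.split₀ c) 0 ([] : List Char)),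
                [PySem.List.pyGetD (PySem.Chars.split₀ c) 1 ([] : List Char)]) := by
          simp only [pvF2]
          rw [if_pos hs, if_pos (by simp)]
          rfl
        rw [hstep]
        have hih := ih t (some (PySem.List.pyGetD (PySem.Chars.split₀ c) 0 ([] : List Char)))
          [PySem.List.pyGetD (PySem.Chars.split₀ c) 1 ([] : List Char)] (by intro g1 h; simp)
        refine hih.trans (List.Perm.of_eq ?_)
        rw [show pvStateList none sp = [] from rfl, List.nil_append]
        rw [show pvStateList (some (PySem.List.pyGetD (PySem.Chars.split₀ c) 0 ([] : List Char)))
            [PySem.List.pyGetD (PySem.Chars.split₀ c) 1 ([] : List Char)]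
          = [[PySem.List.pyGetD (PySem.Chars.split₀ c) 0 ([] : List Char),
              PySem.List.pyGetD (PySem.Chars.split₀ c) 1 ([] : List Char)]] from rfl]
        rw [← hsplit]
        rfl
      · have hsp := hwf g0 rfl
        by_cases hg : PySem.List.pyGetD (PySem.Chars.split₀ c) 0 ([] : List Char) = g0
        · have hsplit' : PySem.Chars.split₀ c
              = [g0, PySem.List.pyGetD (PySem.Chars.split₀ c) 1 ([] : List Char)] :=
            hsplit.trans (by rw [hg])
          have hstep : pvF2 (t, some g0, sp) c
              = (t, some g0, sp ++ [PySem.List.pyGetD (PySem.Chars.split₀ c) 1 ([] : List Char)]) := by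
            simp only [pvF2]
            rw [if_pos hs, if_neg (by simp [hg])]
          rw [hstep]
          have hih := ih t (some g0)
            (sp ++ [PySem.List.pyGetD (PySem.Chars.split₀ c) 1 ([] : List Char)])
            (by intro g1 h; simp)
          refine hih.trans (List.Perm.of_eq ?_)
          have harg : pvStateList (some g0)
              (sp ++ [PySem.List.pyGetD (PySem.Chars.split₀ c) 1 ([] : List Char)])
              ++ (C.filter pvIsSpecies).map PySem.Chars.split₀
            = pvStateList (some g0) sp ++
                (PySem.Chars.split₀ c :: (C.filter pvIsSpecies).map PySem.Chars.split₀) := by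
            rw [show pvStateList (some g0)
                (sp ++ [PySem.List.pyGetD (PySem.Chars.split₀ c) 1 ([] : List Char)])
              = (sp ++ [PySem.List.pyGetD (PySem.Chars.split₀ c) 1 ([] : List Char)]).map
                  (fun w => [g0, w]) from rfl]
            rw [show pvStateList (some g0) sp = sp.map (fun w => [g0, w]) from rfl]
            rw [List.map_append, List.map_singleton, List.append_assoc, List.singleton_append]
            rw [← hsplit']
          rw [harg]
        · have hstep : pvF2 (t, some g0, sp) c
              = (t ++ [g0 ++ [' '] ++ PySem.Chars.join ['/'] sp],
                 some (PySem.List.pyGetD (PySem.Chars.split₀ c) 0 ([] : List Char)),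
                 [PySem.List.pyGetD (PySem.Chars.split₀ c) 1 ([] : List Char)]) := by
            simp only [pvF2]
            rw [if_pos hs, if_pos (by simp [hg])]
            rfl
          rw [hstep]
          have hih := ih (t ++ [g0 ++ [' '] ++ PySem.Chars.join ['/'] sp])
            (some (PySem.List.pyGetD (PySem.Chars.split₀ c) 0 ([] : List Char)))
            [PySem.List.pyGetD (PySem.Chars.split₀ c) 1 ([] : List Char)]
            (by intro g1 h; simp)
          refine hih.trans ?_
          rw [show pvStateList (some (PySem.List.pyGetD (PySem.Chars.split₀ c) 0 ([] : List Char)))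
              [PySem.List.pyGetD (PySem.Chars.split₀ c) 1 ([] : List Char)]
            = [[PySem.List.pyGetD (PySem.Chars.split₀ c) 0 ([] : List Char),
                PySem.List.pyGetD (PySem.Chars.split₀ c) 1 ([] : List Char)]] from rfl]
          rw [← hsplit]
          rw [show pvStateList (some g0) sp = sp.map (fun w => [g0, w]) from rfl]
          rw [pvEntries_block g0 sp hsp
            (PySem.Chars.split₀ c :: (C.filter pvIsSpecies).map PySem.Chars.split₀)
            (Or.inr ⟨_, _, rfl, by exact hg⟩)]
          rw [show ([PySem.Chars.split₀ c] : List (List (List Char)))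
              ++ (C.filter pvIsSpecies).map PySem.Chars.split₀
            = PySem.Chars.split₀ c :: (C.filter pvIsSpecies).map PySem.Chars.split₀ from rfl]
          exact pvPermShift t (C.filter (fun c => !pvIsSpecies c))
            (pvEntries (PySem.Chars.split₀ c :: (C.filter pvIsSpecies).map PySem.Chars.split₀))
            (g0 ++ [' '] ++ PySem.Chars.join ['/'] sp)
    · have hspecF : pvIsSpecies c = false := by unfold pvIsSpecies; simp [hs]
      have hstep : pvF2 (t, g, sp) c = (t ++ [c], g, sp) := by
        simp only [pvF2]
        rw [if_neg hs]
      rw [hstep]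
      have hih := ih (t ++ [c]) g sp hwf
      refine hih.trans (List.Perm.of_eq ?_)
      simp [hspecF, List.append_assoc]

-- final assembly ------------------------------------------------------------

theorem pvA_eq (names : List String) (selectors : List Bool) (asterisk : String)
    (hpre : selectors.length ≤ names.length) :
    format_taxonomy names selectors asterisk
      = String.ofList (PySem.Chars.join [';']
          (PySem.List.sorted (pvTax (pvC names selectors asterisk)) (fun c => c))) := by
  simp only [format_taxonomy]
  rw [show (pvZipLongest (names.map String.toList) selectors).map
      (fun p => (p.1, if p.2 then asterisk.toList else ([] : List Char)))
    = pvPairs names selectors asterisk from rfl]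
  rw [pvCombined_eq names selectors asterisk hpre]
  rw [pvTaxA (pvC names selectors asterisk)]

theorem pvB_eq (names : List String) (selectors : List Bool) (asterisk : String) :
    format_taxonomy_alt names selectors asterisk
      = String.ofList (PySem.Chars.join [';']
          (PySem.List.sorted (pvFlush ((pvC names selectors asterisk).foldl pvF2
            (([] : List (List Char)), (none : Option (List Char)), ([] : List (List Char)))))
            (fun c => c))) := by
  simp only [format_taxonomy_alt]
  rw [pvFlagKeys names selectors]
  rw [show PySem.List.sorted (PySem.Set.ofList (names.map String.toList)) (fun k => k)
    = pvDn names from rfl]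
  have hfold : (pvDn names).foldl
      (fun (st : List (List Char) × Option (List Char) × List (List Char)) n =>
        pvF2 st (n ++ (if ((PySem.List.enumerate names 0).foldl
            (fun d p => d.insert p.2.toList (d.getD p.2.toList false ||
              (if p.1 < (selectors.length : Int) then PySem.List.pyGetD selectors p.1 false
               else false)))
            PySem.Dict.empty).getD n false then asterisk.toList else [])))
      (([] : List (List Char)), (none : Option (List Char)), ([] : List (List Char)))
      = (pvC names selectors asterisk).foldl pvF2
        (([] : List (List Char)), (none : Option (List Char)), ([] : List (List Char))) := by
    unfold pvC
    rw [List.foldl_map]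
    apply PySem.List.foldl_congr_mem
    intro acc n _
    rw [pvFlagB names selectors n]
    rfl
  rw [hfold]
  rfl

-- ===== VERDICT (by name: the statement is the Claim_ definition above) =====
theorem format_taxonomy_spec : Claim_equal_format_taxonomy := by
  intro names selectors asterisk _hdom hpre
  unfold Pre_format_taxonomy at hpre
  unfold Spec_format_taxonomy
  rw [pvA_eq names selectors asterisk hpre, pvB_eq names selectors asterisk]
  have hperm : (pvTax (pvC names selectors asterisk)).Perm
      (pvFlush ((pvC names selectors asterisk).foldl pvF2
        (([] : List (List Char)), (none : Option (List Char)), ([] : List (List Char))))) := by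
    have h := pvMainB names selectors asterisk (pvC names selectors asterisk) [] none []
      (by intro g0 hx; cases hx)
    have he : ([] : List (List Char)) ++ (pvC names selectors asterisk).filter (fun c => !pvIsSpecies c)
        ++ pvEntries (pvStateList none [] ++
          ((pvC names selectors asterisk).filter pvIsSpecies).map PySem.Chars.split₀)
      = pvTax (pvC names selectors asterisk) := by
      rw [show pvStateList none ([] : List (List Char)) = [] from rfl]
      rw [List.nil_append, List.nil_append]
      rfl
    rw [he] at h
    exact h.symm
  have hs : PySem.List.sorted (pvTax (pvC names selectors asterisk)) (fun c => c)
      = PySem.List.sorted (pvFlush ((pvC names selectors asterisk).foldl pvF2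
        (([] : List (List Char)), (none : Option (List Char)), ([] : List (List Char)))))
        (fun c => c) := by
    rw [pvSorted_congr _ _ (fun a b => pvDecLC a b), pvSorted_congr _ _ (fun a b => pvDecLC a b)]
    exact PySem.List.sorted_eq_sorted_of_perm _ _ (fun c => c) (fun a b hab => hab) hperm
  rw [hs]
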